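-- pv_equiv track=rewrite | github.com/somekindofpast/py-bites-regular-bites | dictionary/sum_indices.py | sum_indices
-- ===== SOURCE A (Python) =====
-- from collections import defaultdict
-- from typing import List
--
-- def sum_indices(items: List[str]) -> int:
--     res = 0
--     item_dict = defaultdict(list)
--     for i in range(len(items)):
--         indices = item_dict[items[i]]
--         indices.append(i)
--         res += sum(indices)
--     return res
-- ===== SOURCE B (Python) =====
-- def sum_indices(items):
--     # O(n) back-to-front counting pass: index i contributes i times the number of
--     # occurrences of items[i] at position i or later, so count occurrences from the right.
--     res = 0
--     seen = {}
--     for i, item in reversed(list(enumerate(items))):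
--         c = seen.get(item, 0) + 1
--         seen[item] = c
--         res += i * c
--     return res
-- ===== Notes on version B (the rewrite author's own statement) =====
-- stated objective: faster
-- what changed: B scans the list back to front keeping only a per-key occurrence counter and adds i * count (each index contributes once per later occurrence of its key), instead of A's forward pass that stores every index list per key and re-sums it on each occurrence.
import Mathlib
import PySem

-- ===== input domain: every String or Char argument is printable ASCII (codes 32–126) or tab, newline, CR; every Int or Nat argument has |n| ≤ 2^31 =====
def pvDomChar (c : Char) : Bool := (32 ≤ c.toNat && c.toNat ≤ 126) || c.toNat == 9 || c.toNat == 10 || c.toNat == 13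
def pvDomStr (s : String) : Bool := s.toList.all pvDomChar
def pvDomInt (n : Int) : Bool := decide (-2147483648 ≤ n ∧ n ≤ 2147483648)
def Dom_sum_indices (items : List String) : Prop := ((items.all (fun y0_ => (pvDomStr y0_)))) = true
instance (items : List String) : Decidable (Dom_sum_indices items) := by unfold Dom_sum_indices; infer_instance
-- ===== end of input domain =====

-- B replaces A's forward stored-index-lists-resummed-each-step loop by a backward pass that
-- keeps only a per-key occurrence counter and adds i * count (objective: faster, asymptotic).


-- ===== PORT A =====
def sum_indices (items : List String) : Int :=
  ((PySem.List.pyRange 0 (items.length) 1).foldl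
    (fun (st : Int × PySem.Dict String (List Int)) i =>
      let indices := st.2.getD (PySem.List.pyGetD items i "") [] ++ [i]
      (st.1 + indices.sum, st.2.insert (PySem.List.pyGetD items i "") indices))
    (0, PySem.Dict.empty)).1

-- ===== PORT B =====
def sum_indices_alt (items : List String) : Int :=
  (((PySem.List.enumerate items 0).reverse).foldl
    (fun (st : Int × PySem.Dict String Int) p =>
      let c := st.2.getD p.2 0 + 1
      (st.1 + p.1 * c, st.2.insert p.2 c))
    (0, PySem.Dict.empty)).1

-- ===== PRECONDITION & SPEC =====
def Spec_sum_indices (items : List String) (out : Int) : Prop := out = sum_indices_alt items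
instance (items : List String) (out : Int) : Decidable (Spec_sum_indices items out) := by unfold Spec_sum_indices; infer_instance

-- ===== CLAIM (what is proved, stated in full; the proofs are below) =====
def Claim_equal_sum_indices : Prop := ∀ (items : List String), Dom_sum_indices items → Spec_sum_indices items (sum_indices items)

-- ===== LEMMAS AND PROOFS =====

-- Common closed form: each pair (i, x) contributes i * (1 + later occurrences of x).
def pvS : List (Int × String) → Int
  | [] => 0
  | p :: rest => p.1 * (1 + ((rest.map Prod.snd).count p.2 : Int)) + pvS rest

-- Inserting key ↦ old ++ [x] raises each later lookup-sum of that key by x.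
theorem map_sum_insert (rest : List (Int × String)) (dA : PySem.Dict String (List Int))
    (key : String) (x : Int) :
    (rest.map (fun q => ((dA.insert key (dA.getD key [] ++ [x])).getD q.2 []).sum)).sum
    = (rest.map (fun q => (dA.getD q.2 []).sum)).sum + ((rest.map Prod.snd).count key : Int) * x := by
  induction rest with
  | nil => simp
  | cons q rest ih =>
    simp only [List.map_cons, List.sum_cons, ih, List.count_cons]
    rw [PySem.Dict.getD_insert]
    by_cases h : q.2 = key
    · simp only [h, List.sum_append, List.sum_cons, List.sum_nil, beq_self_eq_true, if_true]
      push_cast; ring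
    · have hb : (q.2 == key) = false := beq_eq_false_iff_ne.mpr h
      simp only [if_neg h, hb, Bool.false_eq_true, if_false, Nat.add_zero]
      ring

-- A's fold: result = res + pvS l + the sums already stored in the dict, once per occurrence.
theorem afold_char (l : List (Int × String)) :
    ∀ (res : Int) (dA : PySem.Dict String (List Int)),
    (l.foldl
      (fun (st : Int × PySem.Dict String (List Int)) p =>
        let indices := st.2.getD p.2 [] ++ [p.1]
        (st.1 + indices.sum, st.2.insert p.2 indices))
      (res, dA)).1
    = res + pvS l + (l.map (fun p => (dA.getD p.2 []).sum)).sum := by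
  induction l with
  | nil => intro res dA; simp [pvS]
  | cons p rest ih =>
    intro res dA
    simp only [List.foldl_cons, List.map_cons, List.sum_cons, pvS]
    rw [ih, map_sum_insert]
    simp only [List.sum_append, List.sum_cons, List.sum_nil]
    ring

-- B's fold (as a foldr): result = res + pvS l, and the dict counts each key's occurrences.
theorem bfold_char (l : List (Int × String)) (res : Int) :
    (l.foldr
      (fun p (st : Int × PySem.Dict String Int) =>
        let c := st.2.getD p.2 0 + 1
        (st.1 + p.1 * c, st.2.insert p.2 c))
      (res, PySem.Dict.empty)).1 = res + pvS l
    ∧ ∀ k, (l.foldr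
      (fun p (st : Int × PySem.Dict String Int) =>
        let c := st.2.getD p.2 0 + 1
        (st.1 + p.1 * c, st.2.insert p.2 c))
      (res, PySem.Dict.empty)).2.getD k 0 = (((l.map Prod.snd).count k : Nat) : Int) := by
  induction l with
  | nil => exact ⟨by simp [pvS], fun k => by simp⟩
  | cons p rest ih =>
    obtain ⟨h1, h2⟩ := ih
    constructor
    · simp only [List.foldr_cons, pvS, h1, h2 p.2]
      ring
    · intro k
      simp only [List.foldr_cons, PySem.Dict.getD_insert, List.map_cons, List.count_cons]
      by_cases h : k = p.2
      · simp [h, h2 p.2]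
      · simp [h, h2 k, Ne.symm h]

-- ===== VERDICT (by name: the statement is the Claim_ definition above) =====
theorem sum_indices_spec : Claim_equal_sum_indices := by
  intro items _
  show sum_indices items = sum_indices_alt items
  unfold sum_indices sum_indices_alt
  rw [List.foldl_reverse]
  have hA := afold_char (PySem.List.enumerate items 0) 0 PySem.Dict.empty
  rw [PySem.List.enumerate_eq_map_pyRange (d := "")] at hA
  rw [List.foldl_map] at hA
  simp only [PySem.Dict.getD_empty, List.sum_nil, PySem.List.len] at hA
  have hB := (bfold_char (PySem.List.enumerate items 0) 0).1
  simp only [List.map_const', List.sum_replicate, smul_zero, add_zero, zero_add] at hA hB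
  rw [hA, hB, PySem.List.enumerate_eq_map_pyRange (d := ""), PySem.List.len]
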